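-- pv_equiv track=rewrite | github.com/Jakubkoz106/matrix-operation | asd.py | sideDiagonal
-- ===== SOURCE A (Python) =====
-- def sideDiagonal(q, A):
--     new = []
--     for i in range(1, q[1] + 1):
--         sb = []
--         for x in range(1, q[0] + 1):
--             sb.append(A[-1 * x][-1 * i])
--         new.append(sb)
--     return new
-- ===== SOURCE B (Python) =====
-- def sideDiagonal(q, A):
--     cols = [[] for _ in range(q[1])]
--     for row in reversed(A[len(A) - q[0]:]):
--         for col, v in zip(cols, reversed(row)):
--             col.append(v)
--     return cols
-- ===== Notes on version B (the rewrite author's own statement) =====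
-- stated objective: idiomatic
-- what changed: B replaces A's nested negative-index arithmetic (column i built by indexing A[-x][-i] for each x) with a slice of the last q[0] rows walked bottom-up, zipping each reversed row onto accumulating output columns.
import Mathlib
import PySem

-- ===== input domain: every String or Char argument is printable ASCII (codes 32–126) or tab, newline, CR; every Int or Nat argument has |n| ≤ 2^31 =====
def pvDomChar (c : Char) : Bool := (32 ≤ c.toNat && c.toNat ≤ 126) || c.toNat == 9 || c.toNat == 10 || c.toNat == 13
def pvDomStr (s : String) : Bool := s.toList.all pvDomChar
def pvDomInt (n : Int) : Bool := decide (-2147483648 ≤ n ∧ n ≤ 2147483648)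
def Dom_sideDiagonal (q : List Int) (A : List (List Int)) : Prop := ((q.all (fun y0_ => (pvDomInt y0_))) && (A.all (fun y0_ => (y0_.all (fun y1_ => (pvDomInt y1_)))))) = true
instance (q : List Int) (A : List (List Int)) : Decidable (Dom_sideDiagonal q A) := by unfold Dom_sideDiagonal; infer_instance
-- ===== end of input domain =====

-- B regroups the data column-major: it slices off the last q[0] rows, walks them bottom-up,
-- and zips each reversed row onto the output columns — no nested index arithmetic (objective: idiomatic).

-- ===== PORT A =====
def sideDiagonal (q : List Int) (A : List (List Int)) : List (List Int) :=
  (PySem.List.pyRange 1 (PySem.List.pyGetD q 1 0 + 1) 1).foldl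
    (fun new i =>
      new ++ [(PySem.List.pyRange 1 (PySem.List.pyGetD q 0 0 + 1) 1).foldl
        (fun sb x => sb ++ [PySem.List.pyGetD (PySem.List.pyGetD A (-1 * x) []) (-1 * i) 0]) []])
    []

-- ===== PORT B =====
-- 'for col, v in zip(cols, reversed(row)): col.append(v)'  (zip stops at the shorter list)
def zipAppendCols : List (List Int) → List Int → List (List Int)
  | [], _ => []
  | cs, [] => cs
  | c :: cs, v :: vs => (c ++ [v]) :: zipAppendCols cs vs

def sideDiagonal_alt (q : List Int) (A : List (List Int)) : List (List Int) :=
  let cols := List.replicate (PySem.List.pyGetD q 1 0).toNat ([] : List Int)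
  ((PySem.List.slice A (some ((A.length : Int) - PySem.List.pyGetD q 0 0)) none).reverse).foldl
    (fun cs row => zipAppendCols cs row.reverse) cols

-- ===== PRECONDITION & SPEC =====
-- Pre_ excludes exactly the inputs on which A raises an IndexError: q shorter than 2, or
-- (both counts positive) q[0] exceeding the number of rows, or q[1] exceeding the length of
-- one of the accessed (last q[0]) rows.
def Pre_sideDiagonal (q : List Int) (A : List (List Int)) : Prop :=
  2 ≤ q.length ∧
    (q.getD 1 0 ≤ 0 ∨ q.getD 0 0 ≤ 0 ∨
      (q.getD 0 0 ≤ (A.length : Int) ∧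
        ∀ r ∈ A.drop (A.length - (q.getD 0 0).toNat), q.getD 1 0 ≤ (r.length : Int)))
instance (q : List Int) (A : List (List Int)) : Decidable (Pre_sideDiagonal q A) := by
  unfold Pre_sideDiagonal; infer_instance

def pvWitness_sideDiagonal : List Int × List (List Int) :=
  ([2, 2], [[1, 2, 3], [4, 5, 6], [7, 8, 9]])

def Spec_sideDiagonal (q : List Int) (A : List (List Int)) (out : List (List Int)) : Prop := out = sideDiagonal_alt q A
instance (q : List Int) (A : List (List Int)) (out : List (List Int)) : Decidable (Spec_sideDiagonal q A out) := by unfold Spec_sideDiagonal; infer_instance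

-- ===== CLAIM (what is proved, stated in full; the proofs are below) =====
def Claim_equal_sideDiagonal : Prop := ∀ (q : List Int) (A : List (List Int)), Dom_sideDiagonal q A → Pre_sideDiagonal q A → Spec_sideDiagonal q A (sideDiagonal q A)

-- ===== LEMMAS AND PROOFS =====

lemma zipAppendCols_nil (vs : List Int) : zipAppendCols [] vs = [] := by
  cases vs <;> rfl

lemma foldl_zip_nil (rs : List (List Int)) :
    rs.foldl (fun cs row => zipAppendCols cs row.reverse) [] = [] := by
  induction rs with
  | nil => rfl
  | cons r rs ih => simpa [zipAppendCols_nil] using ih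

lemma zipAppendCols_range_map (n : Nat) (f : Nat → List Int) (vs : List Int)
    (h : n ≤ vs.length) :
    zipAppendCols ((List.range n).map f) vs
      = (List.range n).map (fun i => f i ++ [vs.getD i 0]) := by
  induction n generalizing f vs with
  | zero => simp [zipAppendCols]
  | succ k ih =>
    cases vs with
    | nil => simp at h
    | cons v vs =>
      simp only [List.range_succ_eq_map, List.map_cons, List.map_map]
      rw [zipAppendCols]
      congr 1
      have := ih (f := fun j => f (j + 1)) vs (by simpa using h)
      simpa [Function.comp, Nat.succ_eq_add_one] using this

lemma foldl_zip_cols (rs : List (List Int)) (n : Nat) (f : Nat → List Int)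
    (h : ∀ r ∈ rs, n ≤ r.length) :
    rs.foldl (fun cs row => zipAppendCols cs row.reverse) ((List.range n).map f)
      = (List.range n).map (fun i => f i ++ rs.map (fun r => r.reverse.getD i 0)) := by
  induction rs generalizing f with
  | nil => simp
  | cons r rs ih =>
    simp only [List.foldl_cons]
    rw [zipAppendCols_range_map n f r.reverse
      (by simpa using h r (by simp))]
    rw [ih (fun i => f i ++ [r.reverse.getD i 0]) (fun s hs => h s (by simp [hs]))]
    simp

-- A's nested foldl as a nested map
lemma sideDiagonal_as_map (q : List Int) (A : List (List Int)) :
    sideDiagonal q A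
      = (List.range (PySem.List.pyGetD q 1 0).toNat).map (fun (i' : Nat) =>
          (List.range (PySem.List.pyGetD q 0 0).toNat).map (fun (x' : Nat) =>
            PySem.List.pyGetD (PySem.List.pyGetD A (-1 * (1 + (x' : Int))) []) (-1 * (1 + (i' : Int))) 0)) := by
  unfold sideDiagonal
  simp only [PySem.List.foldl_append_singleton_eq_map, PySem.List.pyRange_one, List.map_map,
    List.nil_append]
  have h1 : (PySem.List.pyGetD q 1 0 + 1 - 1).toNat = (PySem.List.pyGetD q 1 0).toNat := by omega
  have h0 : (PySem.List.pyGetD q 0 0 + 1 - 1).toNat = (PySem.List.pyGetD q 0 0).toNat := by omega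
  rw [h1, h0]
  simp [Function.comp]

lemma getD_reverse_getD_drop (A : List (List Int)) (m x' : Nat)
    (hm : m ≤ A.length) (hx : x' < m) :
    ((A.drop (A.length - m)).reverse).getD x' ([] : List Int)
      = A.getD (A.length - (x' + 1)) [] := by
  have hlen : (A.drop (A.length - m)).length = m := by
    simp
    omega
  have hx2 : x' < (A.drop (A.length - m)).reverse.length := by simpa [hlen]
  rw [List.getD_eq_getElem _ _ hx2, List.getElem_reverse]
  have hx3 : (A.drop (A.length - m)).length - 1 - x' < (A.drop (A.length - m)).length := by omega
  rw [List.getElem_drop]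
  rw [List.getD_eq_getElem]
  · congr 1
    omega
  · simp; omega

theorem sideDiagonal_spec_aux (q : List Int) (A : List (List Int))
    (hpre : Pre_sideDiagonal q A) : sideDiagonal q A = sideDiagonal_alt q A := by
  obtain ⟨hq, hcases⟩ := hpre
  have hq1 : PySem.List.pyGetD q 1 0 = q.getD 1 0 := by
    simpa using PySem.List.pyGetD_natCast (n := 1) (xs := q) (d := 0)
  have hq0 : PySem.List.pyGetD q 0 0 = q.getD 0 0 := by
    simpa using PySem.List.pyGetD_natCast (n := 0) (xs := q) (d := 0)
  set q1 : Int := q.getD 1 0 with hq1def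
  set q0 : Int := q.getD 0 0 with hq0def
  by_cases hpos1 : q1 ≤ 0
  · -- q[1] ≤ 0: both sides are []
    have hn : (PySem.List.pyGetD q 1 0).toNat = 0 := by rw [hq1]; omega
    rw [sideDiagonal_as_map]
    unfold sideDiagonal_alt
    rw [hn]
    simp only [List.range_zero, List.map_nil, List.replicate_zero]
    exact (foldl_zip_nil _).symm
  · rw [not_le] at hpos1
    set n : Nat := q1.toNat with hn
    set L : Nat := A.length with hL
    by_cases hpos0 : q0 ≤ 0
    · -- q[0] ≤ 0: n empty columns on both sides
      have hm : (PySem.List.pyGetD q 0 0).toNat = 0 := by rw [hq0]; omega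
      rw [sideDiagonal_as_map]
      unfold sideDiagonal_alt
      rw [hm, hq1]
      have hslice : PySem.List.slice A (some ((A.length : Int) - PySem.List.pyGetD q 0 0)) none = A.drop ((A.length : Int) - PySem.List.pyGetD q 0 0).toNat := by
        exact PySem.List.slice_from _ (by rw [hq0]; omega)
      have hdrop : ((A.length : Int) - PySem.List.pyGetD q 0 0).toNat ≥ A.length := by
        rw [hq0]; omega
      rw [hslice, List.drop_eq_nil_of_le hdrop]
      simp [List.map_const']
    · rw [not_le] at hpos0
      -- main case: 0 < q0, 0 < q1
      rcases hcases with h | h | h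
      · omega
      · omega
      obtain ⟨hmL, hrows⟩ := h
      set m : Nat := q0.toNat with hm
      have hmL' : m ≤ L := by omega
      have hslice : PySem.List.slice A (some ((A.length : Int) - PySem.List.pyGetD q 0 0)) none = A.drop (L - m) := by
        rw [PySem.List.slice_from _ (by rw [hq0]; omega), hq0]
        congr 1
        omega
      unfold sideDiagonal_alt
      rw [hq1, hslice, sideDiagonal_as_map, hq1, hq0, ← hn, ← hm]
      have hrep : List.replicate n ([] : List Int) = (List.range n).map (fun _ => ([] : List Int)) := by
        simp [List.map_const']
      rw [hrep, foldl_zip_cols _ n _ (by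
        intro r hr
        have := hrows r (List.mem_reverse.mp hr)
        omega)]
      refine List.map_congr_left (fun i' hi' => ?_)
      simp only [List.nil_append]
      -- both rows are maps over length-m lists; compare elementwise
      apply List.ext_getElem (by simp; omega)
      intro x' hx1 hx2
      have hxm : x' < m := by simpa using hx1
      simp only [List.getElem_map, List.getElem_range]
      -- the accessed row is the same on both sides
      have hxL : x' + 1 ≤ L := by omega
      have hrow : PySem.List.pyGetD A (-1 * (1 + (x' : Int))) [] = A[L - (x' + 1)]'(by omega) := by
        have : (-1 : Int) * (1 + (x' : Int)) = -(((x' + 1 : Nat) : Int)) := by push_cast; ring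
        rw [this, PySem.List.pyGetD_neg_natCast A (x' + 1) [] (by omega) (by omega)]
      have hrev : (A.drop (L - m)).reverse[x']'(by simp; omega) = A[L - (x' + 1)]'(by omega) := by
        have h1 : ((A.drop (L - m)).reverse).getD x' ([] : List Int) = A.getD (L - (x' + 1)) [] := getD_reverse_getD_drop A m x' hmL' hxm
        rw [List.getD_eq_getElem _ _ (by simp; omega), List.getD_eq_getElem _ _ (by omega)] at h1
        exact h1
      rw [hrow, hrev]
      set r : List Int := A[L - (x' + 1)]'(by omega) with hr
      have hrn : n ≤ r.length := by
        have hmem : r ∈ A.drop (L - m) := by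
          rw [hr]
          have : A[L - (x'+1)]'(by omega) = (A.drop (L - m))[m - (x'+1)]'(by simp; omega) := by
            rw [List.getElem_drop]; congr 1; omega
          rw [this]
          exact List.getElem_mem _
        have := hrows r hmem
        omega
      have hi'n : i' < n := by simpa using hi'
      -- left: negative index; right: reverse + getD
      have hL2 : PySem.List.pyGetD r (-1 * (1 + (i' : Int))) 0 = r[r.length - (i' + 1)]'(by omega) := by
        have : (-1 : Int) * (1 + (i' : Int)) = -(((i' + 1 : Nat) : Int)) := by push_cast; ring
        rw [this, PySem.List.pyGetD_neg_natCast r (i' + 1) 0 (by omega) (by omega)]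
      have hR2 : r.reverse.getD i' 0 = r[r.length - (i' + 1)]'(by omega) := by
        rw [List.getD_eq_getElem _ _ (by simp; omega), List.getElem_reverse]
        congr 1
        omega
      rw [hL2, hR2]

-- ===== VERDICT (by name: the statement is the Claim_ definition above) =====
theorem sideDiagonal_spec : Claim_equal_sideDiagonal := by
  intro q A _ hpre
  exact sideDiagonal_spec_aux q A hpre
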